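-- pv_equiv track=rewrite | github.com/jongmung/Coding_Study | studyct.py | solution
-- ===== SOURCE A (Python) =====
-- def solution(strs, t):
--     INF = 99999
--     dp = [INF] * len(t) + [0]
--     for i in range(len(t)-1, -1, -1):
--         for j in range(1, min(6, len(t)-i+1)):
--             if t[i:i+j] in strs:
--                 dp[i] = min(dp[i], dp[i+j]+1)
--     return -1 if dp[0]==INF else dp[0]
-- ===== SOURCE B (Python) =====
-- def solution(strs, t):
--     # Layered BFS over string positions 0..len(t): frontier = positions first
--     # reached with k pieces, visited prunes re-expansion; the first BFS level
--     # containing len(t) is the minimum number of pieces.  The search keeps A's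
--     # contract: INF = 99999 is the piece budget, and -1 means "not reachable
--     # within the budget" (or not at all, when the frontier empties).
--     INF = 99999
--     n = len(t)
--     frontier = {0}
--     visited = {0}
--     for k in range(INF):
--         if n in frontier:
--             return k
--         if not frontier:
--             return -1
--         nxt = set()
--         for p in frontier:
--             for j in range(1, 6):
--                 q = p + j
--                 if q <= n and q not in visited and t[p:q] in strs:
--                     nxt.add(q)
--         visited |= nxt
--         frontier = nxt
--     return -1
-- ===== Notes on version B (the rewrite author's own statement) =====
-- stated objective: alternative
-- what changed: Replaces A's backward DP table (dp filled right-to-left with an INF sentinel, every position of t relaxed unconditionally) by a forward layered BFS over string positions with a frontier and a visited set, bounded by the same INF=99999 piece budget so A's sentinel contract (-1 once 99999 pieces would not suffice) is preserved exactly; the first BFS level containing len(t) is the answer.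
import Mathlib
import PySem

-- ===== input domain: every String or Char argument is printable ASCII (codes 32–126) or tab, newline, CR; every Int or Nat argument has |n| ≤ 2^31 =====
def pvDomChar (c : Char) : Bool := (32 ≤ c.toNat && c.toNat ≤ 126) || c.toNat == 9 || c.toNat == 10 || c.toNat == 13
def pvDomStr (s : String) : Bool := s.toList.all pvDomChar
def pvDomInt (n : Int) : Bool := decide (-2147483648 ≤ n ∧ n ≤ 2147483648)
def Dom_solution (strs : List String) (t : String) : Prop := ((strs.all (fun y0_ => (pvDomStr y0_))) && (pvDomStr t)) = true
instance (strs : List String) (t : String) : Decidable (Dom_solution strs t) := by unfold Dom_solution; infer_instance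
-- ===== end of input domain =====

-- B replaces A's backward DP table by a forward layered BFS (frontier + visited set)
-- over string positions, bounded by the same INF = 99999 piece budget, so A's sentinel
-- convention (-1 once 99999 pieces would not suffice) is preserved; return values are
-- proved equal on every input.

-- ===== PORT A =====
def solution (strs : List String) (t : String) : Int :=
  let INF : Int := 99999
  let n : Int := PySem.Str.len t
  let dp0 : List Int := PySem.List.pyRepeat [INF] n ++ [0]
  let dp := (PySem.List.pyRange (n - 1) (-1) (-1)).foldl (fun dp i =>
      (PySem.List.pyRange 1 (min 6 (n - i + 1))).foldl (fun dp j =>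
        if strs.contains (PySem.Str.slice t (some i) (some (i + j))) then
          PySem.List.pySetD dp i (min (PySem.List.pyGetD dp i 0) (PySem.List.pyGetD dp (i + j) 0 + 1))
        else dp) dp) dp0
  if PySem.List.pyGetD dp 0 0 = INF then -1 else PySem.List.pyGetD dp 0 0

-- ===== PORT B =====
-- condition 'q <= n and q not in visited and t[p:q] in strs' (q = p + j)
def solutionAltCond (strs : List String) (t : String) (n : Int) (visited : PySem.Set Int) (p j : Int) : Bool :=
  decide (p + j ≤ n) && !(PySem.Set.contains visited (p + j)) && strs.contains (PySem.Str.slice t (some p) (some (p + j)))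

-- one BFS level: nxt = { p+j : p in frontier, j in 1..5, cond }
def solutionAltStep (strs : List String) (t : String) (n : Int) (frontier visited : PySem.Set Int) : PySem.Set Int :=
  frontier.foldl (fun nxt p =>
    (PySem.List.pyRange 1 6).foldl (fun nxt j =>
      if solutionAltCond strs t n visited p j then PySem.Set.add nxt (p + j) else nxt) nxt)
    PySem.Set.empty

-- 'for k in range(INF): if n in frontier: return k; if not frontier: return -1; …'
def solutionAltLoop (strs : List String) (t : String) (n : Int) :
    List Int → PySem.Set Int → PySem.Set Int → Int
  | [], _, _ => -1
  | k :: ks, frontier, visited =>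
    if PySem.Set.contains frontier n then k
    else if frontier.isEmpty then -1
    else
      let nxt := solutionAltStep strs t n frontier visited
      solutionAltLoop strs t n ks nxt (PySem.Set.union visited nxt)

def solution_alt (strs : List String) (t : String) : Int :=
  let INF : Int := 99999
  let n : Int := PySem.Str.len t
  solutionAltLoop strs t n (PySem.List.pyRange 0 INF) (PySem.Set.ofList [0]) (PySem.Set.ofList [0])

-- ===== PRECONDITION & SPEC =====
def Spec_solution (strs : List String) (t : String) (out : Int) : Prop := out = solution_alt strs t
instance (strs : List String) (t : String) (out : Int) : Decidable (Spec_solution strs t out) := by unfold Spec_solution; infer_instance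

-- ===== CLAIM (what is proved, stated in full; the proofs are below) =====
def Claim_equal_solution : Prop := ∀ (strs : List String) (t : String), Dom_solution strs t → Spec_solution strs t (solution strs t)

-- ===== LEMMAS AND PROOFS =====

-- a valid piece: t[p:q] (1..5 chars, within t) is one of strs
def pvPiece (strs : List String) (t : String) (p q : Nat) : Prop :=
  p < q ∧ q ≤ p + 5 ∧ q ≤ t.toList.length ∧ PySem.Str.slice t (some (p : Int)) (some ((q : Nat) : Int)) ∈ strs

-- k-step path from p to q, each step a piece
def pvReach (strs : List String) (t : String) : Nat → Nat → Nat → Prop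
  | 0, p, q => p = q
  | k+1, p, q => ∃ r, pvPiece strs t p r ∧ pvReach strs t k r q

-- the set of piece counts that decompose t[i:]
def pvD (strs : List String) (t : String) (i : Nat) : Set Nat :=
  {k | pvReach strs t k i t.toList.length}

-- A's dp value at i: minimum piece count clamped at the INF sentinel, INF when none
noncomputable def pvQ (strs : List String) (t : String) (i : Nat) : Int :=
  haveI := Classical.propDecidable ((pvD strs t i).Nonempty)
  if (pvD strs t i).Nonempty then min 99999 ((sInf (pvD strs t i) : Nat) : Int) else 99999

theorem pvReach_le (strs : List String) (t : String) :
    ∀ k p q, pvReach strs t k p q → p + k ≤ q := by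
  intro k
  induction k with
  | zero => intro p q h; simp [pvReach] at h; omega
  | succ k ih =>
    intro p q h
    obtain ⟨r, hp, hr⟩ := h
    have h1 := hp.1
    have h2 := ih r q hr
    omega

theorem pvReach_snoc (strs : List String) (t : String) :
    ∀ k p e, pvReach strs t (k+1) p e ↔ ∃ r, pvReach strs t k p r ∧ pvPiece strs t r e := by
  intro k
  induction k with
  | zero => intro p e; simp [pvReach]
  | succ k ih =>
    intro p e
    constructor
    · rintro ⟨s, hs, hrest⟩
      obtain ⟨r, hr, hre⟩ := (ih s e).1 hrest
      exact ⟨r, ⟨s, hs, hr⟩, hre⟩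
    · rintro ⟨r, ⟨s, hs, hr⟩, hre⟩
      exact ⟨s, hs, (ih s e).2 ⟨r, hr, hre⟩⟩

theorem pvQ_of_nonempty {strs : List String} {t : String} {i : Nat}
    (h : (pvD strs t i).Nonempty) : pvQ strs t i = min 99999 ((sInf (pvD strs t i) : Nat) : Int) := by
  simp [pvQ, h]

theorem pvQ_of_empty {strs : List String} {t : String} {i : Nat}
    (h : ¬ (pvD strs t i).Nonempty) : pvQ strs t i = 99999 := by
  simp [pvQ, h]

theorem pvQ_len (strs : List String) (t : String) : pvQ strs t t.toList.length = 0 := by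
  have h0 : (0 : Nat) ∈ pvD strs t t.toList.length := by simp [pvD, pvReach]
  rw [pvQ_of_nonempty ⟨0, h0⟩, Nat.sInf_eq_zero.mpr (Or.inl h0)]
  simp

-- ===== A-side =====

-- reads/writes around a pySetD at slot i
theorem pvGetSet_ne (dp : List Int) (i : Nat) (hi : i < dp.length) (v : Int) (j : Int) (hj : 1 ≤ j) :
    PySem.List.pyGetD (PySem.List.pySetD dp (i : Int) v) ((i : Int) + j) 0
      = PySem.List.pyGetD dp ((i : Int) + j) 0 := by
  have hcast : (i : Int) + j = ((i + j.toNat : Nat) : Int) := by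
    push_cast [Int.toNat_of_nonneg (by omega : (0:Int) ≤ j)]; ring
  rw [hcast, PySem.List.pyGetD_pySetD_natCast dp i (i + j.toNat) v 0 hi, if_neg (by omega)]

theorem pvGetSet_self (dp : List Int) (i : Nat) (hi : i < dp.length) (v : Int) :
    PySem.List.pyGetD (PySem.List.pySetD dp (i : Int) v) (i : Int) 0 = v := by
  rw [PySem.List.pyGetD_pySetD_natCast dp i i v 0 hi, if_pos rfl]

-- structural: the inner j-loop only rewrites slot i, accumulating a running min there
theorem pvInnerStructure (c : Int → Bool) :
    ∀ (js : List Int) (dp : List Int) (i : Nat), i < dp.length → (∀ j ∈ js, 1 ≤ j) →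
    js.foldl (fun dp' j =>
        if c j then
          PySem.List.pySetD dp' (i : Int) (min (PySem.List.pyGetD dp' (i : Int) 0) (PySem.List.pyGetD dp' ((i : Int) + j) 0 + 1))
        else dp') dp
    = PySem.List.pySetD dp (i : Int)
        (js.foldl (fun acc j => if c j then min acc (PySem.List.pyGetD dp ((i : Int) + j) 0 + 1) else acc)
          (PySem.List.pyGetD dp (i : Int) 0)) := by
  intro js
  induction js with
  | nil =>
    intro dp i hi _
    simp only [List.foldl_nil]
    have : PySem.List.pyGetD dp (i : Int) 0 = dp[i] := by
      rw [PySem.List.pyGetD_natCast, List.getD_eq_getElem dp 0 hi]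
    rw [this, PySem.List.pySetD_natCast, List.set_getElem_self]
  | cons j js ih =>
    intro dp i hi hjs
    have hj1 : 1 ≤ j := hjs j (List.mem_cons_self)
    have hjs' : ∀ j' ∈ js, 1 ≤ j' := fun j' hj' => hjs j' (List.mem_cons_of_mem j hj')
    simp only [List.foldl_cons]
    by_cases hc : c j = true
    · rw [if_pos hc, if_pos hc]
      set v := min (PySem.List.pyGetD dp (i : Int) 0) (PySem.List.pyGetD dp ((i : Int) + j) 0 + 1) with hv
      have hlen : (PySem.List.pySetD dp (i : Int) v).length = dp.length := by
        rw [PySem.List.pySetD_natCast]; simp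
      rw [ih (PySem.List.pySetD dp (i : Int) v) i (by omega) hjs']
      rw [pvGetSet_self dp i hi v]
      have hfold : js.foldl (fun acc j' => if c j' then
            min acc (PySem.List.pyGetD (PySem.List.pySetD dp (i : Int) v) ((i : Int) + j') 0 + 1) else acc) v
          = js.foldl (fun acc j' => if c j' then
            min acc (PySem.List.pyGetD dp ((i : Int) + j') 0 + 1) else acc) v := by
        apply PySem.List.foldl_congr_mem
        intro acc j' hj'
        rw [pvGetSet_ne dp i hi v j' (hjs' j' hj')]
      rw [hfold, PySem.List.pySetD_natCast, PySem.List.pySetD_natCast, PySem.List.pySetD_natCast,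
        List.set_set]
    · rw [if_neg hc, if_neg hc]
      exact ih dp i hi hjs'

theorem pvPiece_iff (strs : List String) (t : String) (i : Nat) (j : Int)
    (h1 : 1 ≤ j) (h5 : j ≤ 5) (hle : (i : Int) + j ≤ (t.toList.length : Int)) :
    (strs.contains (PySem.Str.slice t (some (i : Int)) (some ((i : Int) + j))) = true)
      ↔ pvPiece strs t i (i + j.toNat) := by
  have hcast : (i : Int) + j = ((i + j.toNat : Nat) : Int) := by
    push_cast [Int.toNat_of_nonneg (by omega : (0:Int) ≤ j)]; ring
  rw [hcast, List.contains_iff_mem]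
  constructor
  · intro hmem
    exact ⟨by omega, by omega, by omega, hmem⟩
  · intro hp
    exact hp.2.2.2

-- value: the running min of candidates pvQ(i+j)+1 (start 99999) is exactly pvQ i
theorem pvValue (strs : List String) (t : String) (i : Nat)
    (hi : i < t.toList.length) :
    ((PySem.List.pyRange 1 (min 6 ((t.toList.length : Int) - (i : Int) + 1))).foldl
      (fun acc j => if strs.contains (PySem.Str.slice t (some (i : Int)) (some ((i : Int) + j))) then
          min acc (pvQ strs t (i + j.toNat) + 1) else acc) 99999)
    = pvQ strs t i := by
  classical
  set c : Int → Bool := fun j => strs.contains (PySem.Str.slice t (some (i : Int)) (some ((i : Int) + j))) with hc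
  set g : Int → Int := fun j => pvQ strs t (i + j.toNat) + 1 with hg
  set L := PySem.List.pyRange 1 (min 6 ((t.toList.length : Int) - (i : Int) + 1)) with hL
  show L.foldl (fun acc j => if c j then min acc (g j) else acc) 99999 = pvQ strs t i
  rw [PySem.List.foldl_if_eq_foldl_filter c (fun acc j => min acc (g j)) L 99999, ← List.foldl_map]
  set C := (L.filter c).map g with hC
  have hmin := PySem.List.foldl_min_le C (99999 : Int)
  have hmem := PySem.List.foldl_min_mem C (99999 : Int)
  set V := C.foldl min 99999 with hV
  have hCmem : ∀ y ∈ C, ∃ j : Int, 1 ≤ j ∧ j ≤ 5 ∧ (i:Int) + j ≤ (t.toList.length : Int) ∧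
      pvPiece strs t i (i + j.toNat) ∧ y = pvQ strs t (i + j.toNat) + 1 := by
    intro y hy
    obtain ⟨j, hjf, rfl⟩ := List.mem_map.1 hy
    obtain ⟨hjL, hjc⟩ := List.mem_filter.1 hjf
    have hrange := PySem.List.mem_pyRange_one.1 (hL ▸ hjL)
    have h6 := lt_min_iff.1 hrange.2
    have h1 : 1 ≤ j := hrange.1
    have h5 : j ≤ 5 := by omega
    have hle : (i:Int) + j ≤ (t.toList.length : Int) := by omega
    exact ⟨j, h1, h5, hle, (pvPiece_iff strs t i j h1 h5 hle).1 hjc, rfl⟩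
  by_cases hne : (pvD strs t i).Nonempty
  · have hdmem : pvReach strs t (sInf (pvD strs t i)) i t.toList.length := Nat.sInf_mem hne
    set d := sInf (pvD strs t i) with hd
    have hdN : i + d ≤ t.toList.length := pvReach_le strs t d i t.toList.length hdmem
    have hd0 : d ≠ 0 := by
      intro h
      rw [h] at hdmem
      have : i = t.toList.length := hdmem
      omega
    obtain ⟨k, hk⟩ : ∃ k, d = k + 1 := ⟨d - 1, by omega⟩
    rw [hk] at hdmem
    obtain ⟨r, hpiece, hreach⟩ := hdmem
    have hri : i < r := hpiece.1
    have hr5 : r ≤ i + 5 := hpiece.2.1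
    have hrN : r ≤ t.toList.length := hpiece.2.2.1
    have hjmem : ((r : Int) - (i : Int)) ∈ L := by
      rw [hL, PySem.List.mem_pyRange_one]
      refine ⟨by omega, lt_min_iff.2 ⟨by omega, by omega⟩⟩
    have hcj : c ((r:Int) - (i:Int)) = true := by
      show strs.contains (PySem.Str.slice t (some (i : Int)) (some ((i : Int) + ((r:Int) - (i:Int))))) = true
      rw [show (i:Int) + ((r:Int) - (i:Int)) = ((r:Nat):Int) from by ring]
      exact List.contains_iff_mem.2 hpiece.2.2.2
    have hyC : pvQ strs t (i + ((r:Int) - (i:Int)).toNat) + 1 ∈ C :=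
      List.mem_map.2 ⟨_, List.mem_filter.2 ⟨hjmem, hcj⟩, rfl⟩
    have hir : i + ((r:Int) - (i:Int)).toNat = r := by omega
    rw [hir] at hyC
    have hPr : pvQ strs t r ≤ (k : Int) := by
      have hne' : (pvD strs t r).Nonempty := ⟨k, hreach⟩
      rw [pvQ_of_nonempty hne']
      have hsle : sInf (pvD strs t r) ≤ k := Nat.sInf_le (show k ∈ pvD strs t r from hreach)
      have : ((sInf (pvD strs t r) : Nat) : Int) ≤ (k : Int) := by exact_mod_cast hsle
      omega
    have hup : V ≤ min 99999 ((d:Nat):Int) := by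
      have h1 : V ≤ pvQ strs t r + 1 := hmin.2 _ hyC
      have h2 : V ≤ 99999 := hmin.1
      rw [hk]; push_cast; omega
    have hlow : ∀ y ∈ C, min 99999 ((d:Nat):Int) ≤ y := by
      intro y hy
      obtain ⟨j, h1, h5, hle, hpc, rfl⟩ := hCmem y hy
      by_cases hq : (pvD strs t (i + j.toNat)).Nonempty
      · have hq1 : pvReach strs t (sInf (pvD strs t (i + j.toNat))) (i + j.toNat) t.toList.length :=
          Nat.sInf_mem hq
        have hin : (sInf (pvD strs t (i + j.toNat)) + 1) ∈ pvD strs t i :=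
          ⟨i + j.toNat, hpc, hq1⟩
        have hdle : d ≤ sInf (pvD strs t (i + j.toNat)) + 1 := Nat.sInf_le hin
        rw [pvQ_of_nonempty hq]
        have : ((d:Nat):Int) ≤ ((sInf (pvD strs t (i + j.toNat)) : Nat) : Int) + 1 := by
          exact_mod_cast hdle
        omega
      · rw [pvQ_of_empty hq]
        omega
    have hdown : min 99999 ((d:Nat):Int) ≤ V := by
      rcases hmem with h | h
      · rw [h]; omega
      · exact hlow V h
    rw [pvQ_of_nonempty hne, ← hd]
    omega
  · have hall : ∀ y ∈ C, y = 100000 := by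
      intro y hy
      obtain ⟨j, h1, h5, hle, hpc, rfl⟩ := hCmem y hy
      have hq : ¬ (pvD strs t (i + j.toNat)).Nonempty := by
        rintro ⟨k, hk2⟩
        exact hne ⟨k+1, ⟨i + j.toNat, hpc, hk2⟩⟩
      rw [pvQ_of_empty hq]
      norm_num
    rw [pvQ_of_empty hne]
    rcases hmem with h | h
    · rw [h]
    · have h1 := hall V h
      have h2 := hmin.1
      omega

-- outer countdown loop: processed slots hold pvQ, unprocessed ones (below m) hold INF
theorem pvOuter (strs : List String) (t : String) :
    ∀ (m : Nat) (dp : List Int), m ≤ t.toList.length → dp.length = t.toList.length + 1 →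
    (∀ r : Nat, r ≤ t.toList.length →
      (m ≤ r → PySem.List.pyGetD dp (r : Int) 0 = pvQ strs t r) ∧
      (r < m → PySem.List.pyGetD dp (r : Int) 0 = 99999)) →
    ∀ r : Nat, r ≤ t.toList.length →
      PySem.List.pyGetD
        ((PySem.List.pyRange ((m : Int) - 1) (-1) (-1)).foldl (fun dp i =>
          (PySem.List.pyRange 1 (min 6 ((t.toList.length : Int) - i + 1))).foldl (fun dp j =>
            if strs.contains (PySem.Str.slice t (some i) (some (i + j))) then
              PySem.List.pySetD dp i (min (PySem.List.pyGetD dp i 0) (PySem.List.pyGetD dp (i + j) 0 + 1))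
            else dp) dp) dp) (r : Int) 0 = pvQ strs t r := by
  intro m
  induction m with
  | zero =>
    intro dp _ _ hdp r hr
    rw [show ((0:Nat):Int) - 1 = (-1 : Int) from by norm_num,
      PySem.List.pyRange_neg_one_eq_nil (by omega)]
    exact (hdp r hr).1 (Nat.zero_le r)
  | succ m ih =>
    intro dp hm hlen hdp r hr
    rw [show (((m+1:Nat)):Int) - 1 = (m:Int) from by push_cast; ring,
      PySem.List.pyRange_neg_one_cons (by omega : (-1:Int) < (m:Int)), List.foldl_cons]
    have hm' : m < t.toList.length := by omega
    have hdpm : PySem.List.pyGetD dp ((m:Nat) : Int) 0 = 99999 :=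
      (hdp m (by omega)).2 (by omega)
    have hstep :
        (PySem.List.pyRange 1 (min 6 ((t.toList.length:Int) - (m:Int) + 1))).foldl
          (fun dp' j => if strs.contains (PySem.Str.slice t (some ((m:Nat):Int)) (some (((m:Nat):Int) + j))) then
              PySem.List.pySetD dp' ((m:Nat):Int) (min (PySem.List.pyGetD dp' ((m:Nat):Int) 0) (PySem.List.pyGetD dp' (((m:Nat):Int) + j) 0 + 1))
            else dp') dp
        = PySem.List.pySetD dp ((m:Nat):Int) (pvQ strs t m) := by
      rw [pvInnerStructure _ _ dp m (by omega) (fun j hj => (PySem.List.mem_pyRange_one.1 hj).1)]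
      congr 1
      rw [hdpm, ← pvValue strs t m hm']
      apply PySem.List.foldl_congr_mem
      intro acc j hj
      have hrg := PySem.List.mem_pyRange_one.1 hj
      have h6 := lt_min_iff.1 hrg.2
      have hread : PySem.List.pyGetD dp ((m:Int) + j) 0 = pvQ strs t (m + j.toNat) := by
        have hcast : (m:Int) + j = ((m + j.toNat : Nat):Int) := by
          push_cast [Int.toNat_of_nonneg (by omega : (0:Int) ≤ j)]; ring
        rw [hcast]
        exact (hdp _ (by omega)).1 (by omega)
      rw [hread]
    rw [hstep]
    apply ih (PySem.List.pySetD dp ((m:Nat):Int) (pvQ strs t m)) (by omega)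
      (by rw [PySem.List.length_pySetD]; exact hlen)
    · intro r' hr'
      constructor
      · intro hmr
        rw [PySem.List.pyGetD_pySetD_natCast dp m r' _ 0 (by omega)]
        by_cases hrm : r' = m
        · rw [if_pos hrm, hrm]
        · rw [if_neg hrm]
          exact (hdp r' hr').1 (by omega)
      · intro hrm
        rw [PySem.List.pyGetD_pySetD_natCast dp m r' _ 0 (by omega), if_neg (by omega)]
        exact (hdp r' hr').2 (by omega)
    · exact hr

theorem pvSolutionA (strs : List String) (t : String) :
    solution strs t = (if pvQ strs t 0 = 99999 then -1 else pvQ strs t 0) := by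
  have hinit : ∀ r : Nat, r ≤ t.toList.length →
      ((t.toList.length ≤ r → PySem.List.pyGetD (List.replicate t.toList.length (99999:Int) ++ [0]) (r:Int) 0 = pvQ strs t r) ∧
       (r < t.toList.length → PySem.List.pyGetD (List.replicate t.toList.length (99999:Int) ++ [0]) (r:Int) 0 = 99999)) := by
    intro r hrle
    constructor
    · intro h
      have hr : r = t.toList.length := le_antisymm hrle h
      subst hr
      rw [PySem.List.pyGetD_natCast, pvQ_len]
      rw [List.getD_eq_getElem _ 0 (by simp)]
      rw [List.getElem_append_right (by simp)]
      simp
    · intro h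
      rw [PySem.List.pyGetD_natCast, List.getD_eq_getElem _ 0 (by simp only [List.length_append, List.length_replicate, List.length_cons, List.length_nil]; omega)]
      rw [List.getElem_append_left (by simpa using h)]
      simp
  have hmain := pvOuter strs t t.toList.length
    (List.replicate t.toList.length (99999:Int) ++ [0]) le_rfl (by simp) hinit
  have h0 := hmain 0 (Nat.zero_le _)
  have h0' : PySem.List.pyGetD
      ((PySem.List.pyRange ((t.toList.length : Int) - 1) (-1) (-1)).foldl (fun dp i =>
        (PySem.List.pyRange 1 (min 6 ((t.toList.length : Int) - i + 1))).foldl (fun dp j =>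
          if strs.contains (PySem.Str.slice t (some i) (some (i + j))) then
            PySem.List.pySetD dp i (min (PySem.List.pyGetD dp i 0) (PySem.List.pyGetD dp (i + j) 0 + 1))
          else dp) dp) (List.replicate t.toList.length (99999:Int) ++ [0])) 0 0 = pvQ strs t 0 := by
    exact_mod_cast h0
  show (let INF : Int := 99999
        let n : Int := PySem.Str.len t
        let dp0 : List Int := PySem.List.pyRepeat [INF] n ++ [0]
        let dp := (PySem.List.pyRange (n - 1) (-1) (-1)).foldl (fun dp i =>
            (PySem.List.pyRange 1 (min 6 (n - i + 1))).foldl (fun dp j =>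
              if strs.contains (PySem.Str.slice t (some i) (some (i + j))) then
                PySem.List.pySetD dp i (min (PySem.List.pyGetD dp i 0) (PySem.List.pyGetD dp (i + j) 0 + 1))
              else dp) dp) dp0
        if PySem.List.pyGetD dp 0 0 = INF then -1 else PySem.List.pyGetD dp 0 0)
      = (if pvQ strs t 0 = 99999 then -1 else pvQ strs t 0)
  simp only [PySem.Str.len_eq, PySem.List.pyRepeat_singleton, Int.toNat_natCast]
  rw [h0']

-- ===== B-side =====

theorem pvMemInner (c : Int → Int → Bool) (p : Int) :
    ∀ (js : List Int) (acc : PySem.Set Int) (x : Int),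
    (x ∈ js.foldl (fun s j => if c p j then PySem.Set.add s (p + j) else s) acc) ↔
      x ∈ acc ∨ ∃ j ∈ js, c p j = true ∧ x = p + j := by
  intro js
  induction js with
  | nil => simp
  | cons j js ih =>
    intro acc x
    cases hc : c p j with
    | false =>
      simp [List.foldl_cons, hc, ih]
      try tauto
    | true =>
      simp only [List.foldl_cons, if_pos hc, ih, PySem.Set.mem_add, List.mem_cons]
      constructor
      · rintro (⟨h | h⟩ | h)
        · exact Or.inl h
        · exact Or.inr ⟨j, Or.inl rfl, hc, h⟩
        · obtain ⟨j', hj', h1, h2⟩ := h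
          exact Or.inr ⟨j', Or.inr hj', h1, h2⟩
      · rintro (h | ⟨j', (rfl | hj'), h1, h2⟩)
        · exact Or.inl (Or.inl h)
        · exact Or.inl (Or.inr h2)
        · exact Or.inr ⟨j', hj', h1, h2⟩

theorem pvMemStep (strs : List String) (t : String) (n : Int) (F V : PySem.Set Int) (x : Int) :
    x ∈ solutionAltStep strs t n F V ↔
      ∃ p ∈ F, ∃ j ∈ PySem.List.pyRange 1 6, solutionAltCond strs t n V p j = true ∧ x = p + j := by
  have aux : ∀ (G : List Int) (acc : PySem.Set Int),
      (x ∈ G.foldl (fun nxt p =>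
        (PySem.List.pyRange 1 6).foldl (fun nxt j =>
          if solutionAltCond strs t n V p j then PySem.Set.add nxt (p + j) else nxt) nxt) acc) ↔
      x ∈ acc ∨ ∃ p ∈ G, ∃ j ∈ PySem.List.pyRange 1 6, solutionAltCond strs t n V p j = true ∧ x = p + j := by
    intro G
    induction G with
    | nil => simp
    | cons p G ih =>
      intro acc
      simp only [List.foldl_cons, ih, pvMemInner (solutionAltCond strs t n V) p, List.mem_cons]
      constructor
      · rintro (⟨h | ⟨j, hj, h1, h2⟩⟩ | ⟨p', hp', hrest⟩)
        · exact Or.inl h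
        · exact Or.inr ⟨p, Or.inl rfl, j, hj, h1, h2⟩
        · exact Or.inr ⟨p', Or.inr hp', hrest⟩
      · rintro (h | ⟨p', (rfl | hp'), hrest⟩)
        · exact Or.inl (Or.inl h)
        · exact Or.inl (Or.inr hrest)
        · exact Or.inr ⟨p', hp', hrest⟩
  unfold solutionAltStep
  rw [aux]
  simp [PySem.Set.empty]

-- BFS invariants: frontier = positions first reached with exactly k pieces,
-- visited = positions reached with at most k pieces
def pvFrInv (strs : List String) (t : String) (k : Nat) (F : PySem.Set Int) : Prop :=
  ∀ x : Int, x ∈ F ↔ ∃ q : Nat, x = (q : Int) ∧ pvReach strs t k 0 q ∧ ∀ j < k, ¬ pvReach strs t j 0 q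

def pvVisInv (strs : List String) (t : String) (k : Nat) (V : PySem.Set Int) : Prop :=
  ∀ x : Int, x ∈ V ↔ ∃ q : Nat, x = (q : Int) ∧ ∃ j ≤ k, pvReach strs t j 0 q

theorem pvStepInv (strs : List String) (t : String) (k : Nat) (F V : PySem.Set Int)
    (hF : pvFrInv strs t k F) (hV : pvVisInv strs t k V) :
    pvFrInv strs t (k+1) (solutionAltStep strs t (t.toList.length : Int) F V) ∧
    pvVisInv strs t (k+1) (PySem.Set.union V (solutionAltStep strs t (t.toList.length : Int) F V)) := by
  have hcontF : ∀ y : Int, PySem.Set.contains V y = false ↔ y ∉ V := by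
    intro y
    rw [Bool.eq_false_iff, Ne, PySem.Set.contains_iff]
  have hFr : pvFrInv strs t (k+1) (solutionAltStep strs t (t.toList.length : Int) F V) := by
    intro x
    rw [pvMemStep]
    constructor
    · rintro ⟨p, hpF, j, hj, hcond, rfl⟩
      obtain ⟨pq, rfl, hreach, _hmin⟩ := (hF p).1 hpF
      have hjr := PySem.List.mem_pyRange_one.1 hj
      simp only [solutionAltCond, Bool.and_eq_true, decide_eq_true_eq, Bool.not_eq_true'] at hcond
      obtain ⟨⟨hle, hnv⟩, hsl⟩ := hcond
      have hnv' : ((pq:Int) + j) ∉ V := (hcontF _).1 hnv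
      have hpiece : pvPiece strs t pq (pq + j.toNat) :=
        (pvPiece_iff strs t pq j hjr.1 (by omega) hle).1 hsl
      have hcast : (pq:Int) + j = ((pq + j.toNat : Nat) : Int) := by
        push_cast [Int.toNat_of_nonneg (by omega : (0:Int) ≤ j)]; ring
      refine ⟨pq + j.toNat, hcast, (pvReach_snoc strs t k 0 _).2 ⟨pq, hreach, hpiece⟩, ?_⟩
      intro j' hj' hrj'
      exact hnv' (hcast ▸ (hV _).2 ⟨pq + j.toNat, rfl, j', by omega, hrj'⟩)
    · rintro ⟨q, rfl, hreach, hmin⟩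
      obtain ⟨r, hr, hpiece⟩ := (pvReach_snoc strs t k 0 q).1 hreach
      have hrmin : ∀ j < k, ¬ pvReach strs t j 0 r := by
        intro j hjk hrj
        exact hmin (j+1) (by omega) ((pvReach_snoc strs t j 0 q).2 ⟨r, hrj, hpiece⟩)
      have hrF : ((r:Int)) ∈ F := (hF (r:Int)).2 ⟨r, rfl, hr, hrmin⟩
      have hrq : r < q := hpiece.1
      have hq5 : q ≤ r + 5 := hpiece.2.1
      have hqN : q ≤ t.toList.length := hpiece.2.2.1
      refine ⟨(r:Int), hrF, ((q:Int) - (r:Int)), PySem.List.mem_pyRange_one.2 ⟨by omega, by omega⟩, ?_, by ring⟩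
      simp only [solutionAltCond, Bool.and_eq_true, decide_eq_true_eq, Bool.not_eq_true']
      have hrr : (r:Int) + ((q:Int) - (r:Int)) = ((q:Nat):Int) := by ring
      rw [hrr]
      refine ⟨⟨by omega, ?_⟩, List.contains_iff_mem.2 hpiece.2.2.2⟩
      rw [hcontF]
      intro hqV
      obtain ⟨q', hq', j', hj', hrj'⟩ := (hV _).1 hqV
      have : q' = q := by exact_mod_cast hq'.symm
      subst this
      exact hmin j' (by omega) hrj'
  refine ⟨hFr, ?_⟩
  intro x
  rw [PySem.Set.mem_union]
  constructor
  · rintro (hx | hx)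
    · obtain ⟨q, rfl, j, hj, hr⟩ := (hV x).1 hx
      exact ⟨q, rfl, j, by omega, hr⟩
    · obtain ⟨q, rfl, hre, _⟩ := (hFr x).1 hx
      exact ⟨q, rfl, k+1, le_rfl, hre⟩
  · rintro ⟨q, rfl, j, hjk, hr⟩
    by_cases hjk' : j ≤ k
    · exact Or.inl ((hV _).2 ⟨q, rfl, j, hjk', hr⟩)
    · have hjeq : j = k + 1 := by omega
      subst hjeq
      by_cases hvq : ((q:Int)) ∈ V
      · exact Or.inl hvq
      · refine Or.inr ((hFr _).2 ⟨q, rfl, hr, ?_⟩)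
        intro j' hj' hrj'
        exact hvq ((hV _).2 ⟨q, rfl, j', by omega, hrj'⟩)

theorem pvReach_split (strs : List String) (t : String) :
    ∀ (a b p q : Nat), pvReach strs t (a + b) p q ↔ ∃ r, pvReach strs t a p r ∧ pvReach strs t b r q := by
  intro a
  induction a with
  | zero =>
    intro b p q
    simp only [Nat.zero_add]
    constructor
    · intro h; exact ⟨p, rfl, h⟩
    · rintro ⟨r, hr, hb⟩
      have : p = r := hr
      subst this; exact hb
  | succ a ih =>
    intro b p q
    have hadd : a + 1 + b = (a + b) + 1 := by omega
    rw [hadd]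
    constructor
    · rintro ⟨r, hpiece, hrest⟩
      obtain ⟨m, hm, hmb⟩ := (ih b r q).1 hrest
      exact ⟨m, ⟨r, hpiece, hm⟩, hmb⟩
    · rintro ⟨m, ⟨r, hpiece, hm⟩, hmb⟩
      exact ⟨r, hpiece, (ih b r q).2 ⟨m, hm, hmb⟩⟩

-- if the level-k frontier is empty and t[0:] was not finished below level k, no split exists at all
theorem pvFrEmpty (strs : List String) (t : String) (k : Nat) (F : PySem.Set Int)
    (hF : pvFrInv strs t k F) (hemp : F.isEmpty = true)
    (hpre : ∀ j < k, ¬ pvReach strs t j 0 t.toList.length) :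
    ¬ (pvD strs t 0).Nonempty := by
  intro hne
  have hmin := Nat.sInf_mem hne
  set m := sInf (pvD strs t 0) with hm
  have hkm : k ≤ m := by
    by_contra h
    exact hpre m (by omega) hmin
  have hsplit : ∃ r, pvReach strs t k 0 r ∧ pvReach strs t (m - k) r t.toList.length := by
    have : k + (m - k) = m := by omega
    exact (pvReach_split strs t k (m - k) 0 t.toList.length).1 (by rw [this]; exact hmin)
  obtain ⟨r, hr, hrn⟩ := hsplit
  have hrmin : ∀ j < k, ¬ pvReach strs t j 0 r := by
    intro j hj hjr
    have : pvReach strs t (j + (m - k)) 0 t.toList.length :=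
      (pvReach_split strs t j (m - k) 0 t.toList.length).2 ⟨r, hjr, hrn⟩
    have hle := Nat.sInf_le (show (j + (m - k)) ∈ pvD strs t 0 from this)
    omega
  have hrF : ((r : Nat) : Int) ∈ F := (hF _).2 ⟨r, rfl, hr, hrmin⟩
  rw [List.isEmpty_iff] at hemp
  rw [hemp] at hrF
  exact (List.not_mem_nil) hrF

theorem pvLoopCons (strs : List String) (t : String) (n k : Int) (ks : List Int) (F V : PySem.Set Int) :
    solutionAltLoop strs t n (k :: ks) F V =
      if PySem.Set.contains F n then k
      else if F.isEmpty then -1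
      else solutionAltLoop strs t n ks (solutionAltStep strs t n F V)
        (PySem.Set.union V (solutionAltStep strs t n F V)) := rfl

theorem pvLoop (strs : List String) (t : String) :
    ∀ (k : Nat) (F V : PySem.Set Int), k ≤ 99999 →
    pvFrInv strs t k F → pvVisInv strs t k V →
    (∀ j < k, ¬ pvReach strs t j 0 t.toList.length) →
    solutionAltLoop strs t (t.toList.length : Int)
      (PySem.List.pyRange (k : Int) 99999) F V
    = (if pvQ strs t 0 = 99999 then -1 else pvQ strs t 0) := by
  intro k
  generalize hfuel : 99999 - k = fuel
  induction fuel generalizing k with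
  | zero =>
    intro F V hk hF hV hpre
    have hkeq : k = 99999 := by omega
    subst hkeq
    rw [PySem.List.pyRange_one_eq_nil (by norm_num)]
    have hq : pvQ strs t 0 = 99999 := by
      by_cases hne : (pvD strs t 0).Nonempty
      · have hge : 99999 ≤ sInf (pvD strs t 0) := by
          by_contra h
          exact hpre _ (by omega) (Nat.sInf_mem hne)
        rw [pvQ_of_nonempty hne, min_eq_left (by exact_mod_cast hge)]
      · exact pvQ_of_empty hne
    rw [hq, if_pos rfl]
    rfl
  | succ f ih =>
    intro F V hk hF hV hpre
    have hklt : k < 99999 := by omega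
    rw [PySem.List.pyRange_one_cons (by exact_mod_cast hklt)]
    rw [pvLoopCons]
    by_cases hfound : PySem.Set.contains F ((t.toList.length : Nat) : Int) = true
    · rw [if_pos hfound]
      obtain ⟨q, hq, hreach, _⟩ := (hF _).1 (PySem.Set.contains_iff F _ |>.1 hfound)
      have hqN : q = t.toList.length := by exact_mod_cast hq.symm
      subst hqN
      have hne : (pvD strs t 0).Nonempty := ⟨k, hreach⟩
      have h1 : sInf (pvD strs t 0) ≤ k := Nat.sInf_le hreach
      have h2 : ¬ (sInf (pvD strs t 0) < k) := fun hlt => hpre _ hlt (Nat.sInf_mem hne)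
      have hs : sInf (pvD strs t 0) = k := by omega
      have hqv : pvQ strs t 0 = (k : Int) := by
        rw [pvQ_of_nonempty hne, hs, min_eq_right (by exact_mod_cast (by omega : k ≤ 99999))]
      rw [hqv, if_neg (by exact_mod_cast (by omega : ¬ (k : Int) = 99999))]
    · rw [if_neg hfound]
      by_cases hemp : F.isEmpty = true
      · rw [if_pos hemp]
        have hq : pvQ strs t 0 = 99999 := pvQ_of_empty (pvFrEmpty strs t k F hF hemp hpre)
        rw [hq, if_pos rfl]
      · rw [if_neg hemp]
        have hnk : ¬ pvReach strs t k 0 t.toList.length := by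
          intro hre
          exact hfound (PySem.Set.contains_iff F _ |>.2 ((hF _).2 ⟨t.toList.length, rfl, hre, hpre⟩))
        have hpre' : ∀ j < k + 1, ¬ pvReach strs t j 0 t.toList.length := by
          intro j hj
          rcases Nat.lt_succ_iff_lt_or_eq.1 hj with h | h
          · exact hpre j h
          · subst h; exact hnk
        obtain ⟨hF', hV'⟩ := pvStepInv strs t k F V hF hV
        have := ih (k+1) (by omega) (solutionAltStep strs t (t.toList.length : Int) F V)
          (PySem.Set.union V (solutionAltStep strs t (t.toList.length : Int) F V))
          (by omega) hF' hV' hpre'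
        rw [show ((k:Nat):Int) + 1 = (((k+1:Nat)):Int) from by push_cast; ring]
        exact this

theorem pvSolutionB (strs : List String) (t : String) :
    solution_alt strs t = (if pvQ strs t 0 = 99999 then -1 else pvQ strs t 0) := by
  have hF0 : pvFrInv strs t 0 (PySem.Set.ofList [0]) := by
    intro x
    constructor
    · intro hx
      have hx0 : x = 0 := by
        simpa [show PySem.Set.ofList [(0:Int)] = [0] from rfl] using hx
      exact ⟨0, by simpa using hx0, rfl, by omega⟩
    · rintro ⟨q, rfl, hre, _⟩
      have : 0 = q := hre
      subst this
      simp [show PySem.Set.ofList [(0:Int)] = [0] from rfl]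
  have hV0 : pvVisInv strs t 0 (PySem.Set.ofList [0]) := by
    intro x
    constructor
    · intro hx
      have hx0 : x = 0 := by
        simpa [show PySem.Set.ofList [(0:Int)] = [0] from rfl] using hx
      exact ⟨0, by simpa using hx0, 0, le_rfl, rfl⟩
    · rintro ⟨q, rfl, j, hj, hre⟩
      have hj0 : j = 0 := by omega
      subst hj0
      have : 0 = q := hre
      subst this
      simp [show PySem.Set.ofList [(0:Int)] = [0] from rfl]
  have hmain := pvLoop strs t 0 (PySem.Set.ofList [0]) (PySem.Set.ofList [0])
    (by omega) hF0 hV0 (by omega)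
  show solutionAltLoop strs t (PySem.Str.len t)
      (PySem.List.pyRange 0 99999) (PySem.Set.ofList [0]) (PySem.Set.ofList [0]) = _
  rw [PySem.Str.len_eq]
  rw [show (0:Int) = ((0:Nat):Int) from rfl]
  exact hmain

-- ===== VERDICT (by name: the statement is the Claim_ definition above) =====
theorem solution_spec : Claim_equal_solution := by
  intro strs t _hdom
  unfold Spec_solution
  rw [pvSolutionA strs t, pvSolutionB strs t]
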